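-- pv_equiv track=rewrite | github.com/MartinPellizzer/terrawhisper-make | scrape_wikidata.py | compress_to_7_ranks
-- ===== SOURCE A (Python) =====
-- def compress_to_7_ranks(lineage):
--     """
--     lineage: list of tuples (tax_id, parent_tax_id, rank, name)
--     returns: dict with 7-level taxonomy
--     """
--
--     # target structure
--     taxonomy = {
--         "kingdom": None,
--         "phylum": None,
--         "class": None,
--         "order": None,
--         "family": None,
--         "genus": None,
--         "species": None
--     }
--
--     # NCBI uses "phylum" or "division" for plants
--     rank_map = {
--         "superkingdom": "kingdom",
--         "kingdom": "kingdom",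
--         "phylum": "phylum",
--         "division": "phylum",
--
--         "class": "class",
--         "order": "order",
--         "family": "family",
--         "genus": "genus",
--         "species": "species"
--     }
--
--     for tax_id, parent_id, rank, name in lineage:
--         if rank in rank_map:
--             canonical_rank = rank_map[rank]
--
--             # keep first match (most specific in upward traversal)
--             if taxonomy[canonical_rank] is None:
--                 taxonomy[canonical_rank] = name
--
--     return taxonomy
-- ===== SOURCE B (Python) =====
-- def compress_to_7_ranks(lineage):
--     """
--     lineage: list of tuples (tax_id, parent_tax_id, rank, name)
--     returns: dict with 7-level taxonomy
--     """
--     def canonical(rank):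
--         if rank == "superkingdom" or rank == "kingdom":
--             return "kingdom"
--         if rank == "division":
--             return "phylum"
--         if rank in ("phylum", "class", "order", "family", "genus", "species"):
--             return rank
--         return None
--
--     def first_name(c, items):
--         for _tax_id, _parent_id, rank, name in items:
--             if canonical(rank) == c:
--                 return name
--         return None
--
--     return {c: first_name(c, lineage)
--             for c in ("kingdom", "phylum", "class", "order", "family", "genus", "species")}
-- ===== Notes on version B (the rewrite author's own statement) =====
-- stated objective: alternative
-- what changed: A makes one pass over the lineage, filling a pre-initialised 7-key dict under an is-None guard using a rank_map dict; B drops the dicts entirely: a pure if-chain maps a rank to its canonical rank, and the result is built per canonical rank by an independent first-match scan of the lineage (seven scans instead of one populate-as-you-go pass).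
import Mathlib
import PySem

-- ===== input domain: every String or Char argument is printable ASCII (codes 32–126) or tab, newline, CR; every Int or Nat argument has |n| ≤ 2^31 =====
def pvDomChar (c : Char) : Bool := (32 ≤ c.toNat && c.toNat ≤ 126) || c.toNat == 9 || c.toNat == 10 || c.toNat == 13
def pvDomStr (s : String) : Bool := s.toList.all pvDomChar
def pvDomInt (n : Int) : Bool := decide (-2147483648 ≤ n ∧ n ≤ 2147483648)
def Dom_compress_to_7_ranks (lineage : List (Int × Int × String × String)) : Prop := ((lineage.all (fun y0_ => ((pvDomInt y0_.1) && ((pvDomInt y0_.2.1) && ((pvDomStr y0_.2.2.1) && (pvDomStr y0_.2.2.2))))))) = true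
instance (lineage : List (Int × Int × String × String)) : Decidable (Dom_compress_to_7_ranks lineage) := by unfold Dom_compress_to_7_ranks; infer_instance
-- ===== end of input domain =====

-- B drops A's two dicts and its single populate-as-you-go pass: a pure if-chain canonicalises a
-- rank and each of the seven canonical ranks gets its own independent first-match scan of the
-- lineage (objective: alternative decomposition).

-- ===== PORT A =====
-- A's rank_map dict literal (distinct keys, insertion order)
def rankMapA : PySem.Dict String String := PySem.Dict.mk
  [("superkingdom","kingdom"),("kingdom","kingdom"),("phylum","phylum"),("division","phylum"),
   ("class","class"),("order","order"),("family","family"),("genus","genus"),("species","species")]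

-- A's initial taxonomy dict literal
def initTaxonomyA : PySem.Dict String (Option String) := PySem.Dict.mk
  [("kingdom",none),("phylum",none),("class",none),("order",none),
   ("family",none),("genus",none),("species",none)]

-- one iteration of A's for-loop: 'if rank in rank_map: … if taxonomy[canonical] is None: …'
-- (taxonomy[canonical] always finds its key; the unreachable missing-key case leaves tax unchanged)
def stepA (tax : PySem.Dict String (Option String)) (e : Int × Int × String × String) :
    PySem.Dict String (Option String) :=
  match rankMapA.get? e.2.2.1 with
  | some canonical =>
      match tax.get? canonical with
      | some none => tax.insert canonical (some e.2.2.2)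
      | _ => tax
  | none => tax

def compress_to_7_ranks (lineage : List (Int × Int × String × String)) : List (String × Option String) :=
  (lineage.foldl stepA initTaxonomyA).items

-- ===== PORT B =====
-- B's 'canonical(rank)' if-chain (no dict)
def canonB (r : String) : Option String :=
  if r == "superkingdom" || r == "kingdom" then some "kingdom"
  else if r == "division" then some "phylum"
  else if r == "phylum" || r == "class" || r == "order" || r == "family" || r == "genus" || r == "species" then some r
  else none

-- B's 'first_name(c, items)' loop with early return (Python 'canonical(rank) == c': None == c is false)
def firstNameB (c : String) : List (Int × Int × String × String) → Option String
  | [] => none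
  | e :: rest => if canonB e.2.2.1 == some c then some e.2.2.2 else firstNameB c rest

-- B's dict comprehension over the seven canonical ranks
def compress_to_7_ranks_alt (lineage : List (Int × Int × String × String)) : List (String × Option String) :=
  [("kingdom", firstNameB "kingdom" lineage),
   ("phylum", firstNameB "phylum" lineage),
   ("class", firstNameB "class" lineage),
   ("order", firstNameB "order" lineage),
   ("family", firstNameB "family" lineage),
   ("genus", firstNameB "genus" lineage),
   ("species", firstNameB "species" lineage)]

-- ===== PRECONDITION & SPEC =====
def Spec_compress_to_7_ranks (lineage : List (Int × Int × String × String)) (out : List (String × Option String)) : Prop := out = compress_to_7_ranks_alt lineage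
instance (lineage : List (Int × Int × String × String)) (out : List (String × Option String)) : Decidable (Spec_compress_to_7_ranks lineage out) := by unfold Spec_compress_to_7_ranks; infer_instance

-- ===== CLAIM (what is proved, stated in full; the proofs are below) =====
def Claim_equal_compress_to_7_ranks : Prop := ∀ (lineage : List (Int × Int × String × String)), Dom_compress_to_7_ranks lineage → Spec_compress_to_7_ranks lineage (compress_to_7_ranks lineage)

-- ===== LEMMAS AND PROOFS =====

-- proof-side helpers: A's dict state always has exactly these seven keys
def mk7 (v1 v2 v3 v4 v5 v6 v7 : Option String) : PySem.Dict String (Option String) :=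
  PySem.Dict.mk [("kingdom",v1),("phylum",v2),("class",v3),("order",v4),("family",v5),("genus",v6),("species",v7)]

-- the value slot c ends with, starting from v, after A scans l: keep v if filled, else first match
def pick (v : Option String) (c : String) (l : List (Int × Int × String × String)) : Option String :=
  match v with
  | some x => some x
  | none => firstNameB c l

-- B's if-chain computes exactly A's rank_map lookup
lemma canonB_eq (r : String) : canonB r = rankMapA.get? r := by
  simp only [rankMapA, PySem.Dict.get?, List.find?, canonB]
  by_cases h1 : r = "superkingdom" <;> by_cases h2 : r = "kingdom" <;>
  by_cases h3 : r = "phylum" <;> by_cases h4 : r = "division" <;>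
  by_cases h5 : r = "class" <;> by_cases h6 : r = "order" <;>
  by_cases h7 : r = "family" <;> by_cases h8 : r = "genus" <;>
  by_cases h9 : r = "species" <;>
    first
      | (simp_all; done)
      | (simp only [show ("superkingdom" == r) = false from beq_eq_false_iff_ne.mpr (Ne.symm h1),
           show ("kingdom" == r) = false from beq_eq_false_iff_ne.mpr (Ne.symm h2),
           show ("phylum" == r) = false from beq_eq_false_iff_ne.mpr (Ne.symm h3),
           show ("division" == r) = false from beq_eq_false_iff_ne.mpr (Ne.symm h4),
           show ("class" == r) = false from beq_eq_false_iff_ne.mpr (Ne.symm h5),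
           show ("order" == r) = false from beq_eq_false_iff_ne.mpr (Ne.symm h6),
           show ("family" == r) = false from beq_eq_false_iff_ne.mpr (Ne.symm h7),
           show ("genus" == r) = false from beq_eq_false_iff_ne.mpr (Ne.symm h8),
           show ("species" == r) = false from beq_eq_false_iff_ne.mpr (Ne.symm h9)]; simp [h1, h2, h3, h4, h5, h6, h7, h8, h9])

lemma canonical_cases (r c : String) (h : rankMapA.get? r = some c) :
    c = "kingdom" ∨ c = "phylum" ∨ c = "class" ∨ c = "order" ∨ c = "family" ∨ c = "genus" ∨ c = "species" := by
  simp [rankMapA, PySem.Dict.get?_mk_cons] at h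
  split_ifs at h <;> first | (injection h with h; tauto) | simp [PySem.Dict.get?] at h

lemma fold_mk7 (l : List (Int × Int × String × String)) :
    ∀ (v1 v2 v3 v4 v5 v6 v7 : Option String),
    (l.foldl stepA (mk7 v1 v2 v3 v4 v5 v6 v7)).items =
      [("kingdom", pick v1 "kingdom" l), ("phylum", pick v2 "phylum" l),
       ("class", pick v3 "class" l), ("order", pick v4 "order" l),
       ("family", pick v5 "family" l), ("genus", pick v6 "genus" l),
       ("species", pick v7 "species" l)] := by
  induction l with
  | nil =>
      intro v1 v2 v3 v4 v5 v6 v7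
      cases v1 <;> cases v2 <;> cases v3 <;> cases v4 <;> cases v5 <;> cases v6 <;> cases v7 <;>
        simp [mk7, pick, firstNameB]
  | cons e l ih =>
      intro v1 v2 v3 v4 v5 v6 v7
      rcases e with ⟨t, p, r, n⟩
      simp only [List.foldl_cons]
      rcases hc : rankMapA.get? r with _ | c
      · have hstep : stepA (mk7 v1 v2 v3 v4 v5 v6 v7) (t, p, r, n) = mk7 v1 v2 v3 v4 v5 v6 v7 := by
          simp [stepA, hc]
        have hfn : ∀ c', firstNameB c' ((t, p, r, n) :: l) = firstNameB c' l := by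
          intro c'; simp [firstNameB, canonB_eq, hc]
        have hpick : ∀ v c', pick v c' ((t, p, r, n) :: l) = pick v c' l := by
          intro v c'; cases v <;> simp [pick, hfn]
        rw [hstep, ih, hpick, hpick, hpick, hpick, hpick, hpick, hpick]
      · have hfn_ne : ∀ c', c ≠ c' → firstNameB c' ((t, p, r, n) :: l) = firstNameB c' l := by
          intro c' hne
          simp [firstNameB, canonB_eq, hc, hne]
        have hfn_eq : firstNameB c ((t, p, r, n) :: l) = some n := by
          simp [firstNameB, canonB_eq, hc]
        have hpick_ne : ∀ (v : Option String) c', c ≠ c' → pick v c' ((t, p, r, n) :: l) = pick v c' l := by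
          intro v c' hne; cases v <;> simp [pick, hfn_ne c' hne]
        rcases canonical_cases r c hc with h | h | h | h | h | h | h
        · subst h
          cases v1 with
          | none =>
              have hstep : stepA (mk7 none v2 v3 v4 v5 v6 v7) (t, p, r, n) = mk7 (some n) v2 v3 v4 v5 v6 v7 := by
                simp only [stepA]; rw [hc]
                simp [mk7, PySem.Dict.get?_mk_cons, PySem.Dict.insert]
              rw [hstep, ih, hpick_ne v2 "phylum" (by decide),
                  hpick_ne v3 "class" (by decide),
                  hpick_ne v4 "order" (by decide),
                  hpick_ne v5 "family" (by decide),
                  hpick_ne v6 "genus" (by decide),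
                  hpick_ne v7 "species" (by decide)]
              simp [pick, hfn_eq]
          | some x =>
              have hstep : stepA (mk7 (some x) v2 v3 v4 v5 v6 v7) (t, p, r, n) = mk7 (some x) v2 v3 v4 v5 v6 v7 := by
                simp only [stepA]; rw [hc]
                simp [mk7, PySem.Dict.get?_mk_cons]
              rw [hstep, ih, hpick_ne v2 "phylum" (by decide),
                  hpick_ne v3 "class" (by decide),
                  hpick_ne v4 "order" (by decide),
                  hpick_ne v5 "family" (by decide),
                  hpick_ne v6 "genus" (by decide),
                  hpick_ne v7 "species" (by decide)]
              simp [pick]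
        · subst h
          cases v2 with
          | none =>
              have hstep : stepA (mk7 v1 none v3 v4 v5 v6 v7) (t, p, r, n) = mk7 v1 (some n) v3 v4 v5 v6 v7 := by
                simp only [stepA]; rw [hc]
                simp [mk7, PySem.Dict.get?_mk_cons, PySem.Dict.insert]
              rw [hstep, ih, hpick_ne v1 "kingdom" (by decide),
                  hpick_ne v3 "class" (by decide),
                  hpick_ne v4 "order" (by decide),
                  hpick_ne v5 "family" (by decide),
                  hpick_ne v6 "genus" (by decide),
                  hpick_ne v7 "species" (by decide)]
              simp [pick, hfn_eq]
          | some x =>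
              have hstep : stepA (mk7 v1 (some x) v3 v4 v5 v6 v7) (t, p, r, n) = mk7 v1 (some x) v3 v4 v5 v6 v7 := by
                simp only [stepA]; rw [hc]
                simp [mk7, PySem.Dict.get?_mk_cons]
              rw [hstep, ih, hpick_ne v1 "kingdom" (by decide),
                  hpick_ne v3 "class" (by decide),
                  hpick_ne v4 "order" (by decide),
                  hpick_ne v5 "family" (by decide),
                  hpick_ne v6 "genus" (by decide),
                  hpick_ne v7 "species" (by decide)]
              simp [pick]
        · subst h
          cases v3 with
          | none =>
              have hstep : stepA (mk7 v1 v2 none v4 v5 v6 v7) (t, p, r, n) = mk7 v1 v2 (some n) v4 v5 v6 v7 := by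
                simp only [stepA]; rw [hc]
                simp [mk7, PySem.Dict.get?_mk_cons, PySem.Dict.insert]
              rw [hstep, ih, hpick_ne v1 "kingdom" (by decide),
                  hpick_ne v2 "phylum" (by decide),
                  hpick_ne v4 "order" (by decide),
                  hpick_ne v5 "family" (by decide),
                  hpick_ne v6 "genus" (by decide),
                  hpick_ne v7 "species" (by decide)]
              simp [pick, hfn_eq]
          | some x =>
              have hstep : stepA (mk7 v1 v2 (some x) v4 v5 v6 v7) (t, p, r, n) = mk7 v1 v2 (some x) v4 v5 v6 v7 := by
                simp only [stepA]; rw [hc]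
                simp [mk7, PySem.Dict.get?_mk_cons]
              rw [hstep, ih, hpick_ne v1 "kingdom" (by decide),
                  hpick_ne v2 "phylum" (by decide),
                  hpick_ne v4 "order" (by decide),
                  hpick_ne v5 "family" (by decide),
                  hpick_ne v6 "genus" (by decide),
                  hpick_ne v7 "species" (by decide)]
              simp [pick]
        · subst h
          cases v4 with
          | none =>
              have hstep : stepA (mk7 v1 v2 v3 none v5 v6 v7) (t, p, r, n) = mk7 v1 v2 v3 (some n) v5 v6 v7 := by
                simp only [stepA]; rw [hc]
                simp [mk7, PySem.Dict.get?_mk_cons, PySem.Dict.insert]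
              rw [hstep, ih, hpick_ne v1 "kingdom" (by decide),
                  hpick_ne v2 "phylum" (by decide),
                  hpick_ne v3 "class" (by decide),
                  hpick_ne v5 "family" (by decide),
                  hpick_ne v6 "genus" (by decide),
                  hpick_ne v7 "species" (by decide)]
              simp [pick, hfn_eq]
          | some x =>
              have hstep : stepA (mk7 v1 v2 v3 (some x) v5 v6 v7) (t, p, r, n) = mk7 v1 v2 v3 (some x) v5 v6 v7 := by
                simp only [stepA]; rw [hc]
                simp [mk7, PySem.Dict.get?_mk_cons]
              rw [hstep, ih, hpick_ne v1 "kingdom" (by decide),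
                  hpick_ne v2 "phylum" (by decide),
                  hpick_ne v3 "class" (by decide),
                  hpick_ne v5 "family" (by decide),
                  hpick_ne v6 "genus" (by decide),
                  hpick_ne v7 "species" (by decide)]
              simp [pick]
        · subst h
          cases v5 with
          | none =>
              have hstep : stepA (mk7 v1 v2 v3 v4 none v6 v7) (t, p, r, n) = mk7 v1 v2 v3 v4 (some n) v6 v7 := by
                simp only [stepA]; rw [hc]
                simp [mk7, PySem.Dict.get?_mk_cons, PySem.Dict.insert]
              rw [hstep, ih, hpick_ne v1 "kingdom" (by decide),
                  hpick_ne v2 "phylum" (by decide),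
                  hpick_ne v3 "class" (by decide),
                  hpick_ne v4 "order" (by decide),
                  hpick_ne v6 "genus" (by decide),
                  hpick_ne v7 "species" (by decide)]
              simp [pick, hfn_eq]
          | some x =>
              have hstep : stepA (mk7 v1 v2 v3 v4 (some x) v6 v7) (t, p, r, n) = mk7 v1 v2 v3 v4 (some x) v6 v7 := by
                simp only [stepA]; rw [hc]
                simp [mk7, PySem.Dict.get?_mk_cons]
              rw [hstep, ih, hpick_ne v1 "kingdom" (by decide),
                  hpick_ne v2 "phylum" (by decide),
                  hpick_ne v3 "class" (by decide),
                  hpick_ne v4 "order" (by decide),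
                  hpick_ne v6 "genus" (by decide),
                  hpick_ne v7 "species" (by decide)]
              simp [pick]
        · subst h
          cases v6 with
          | none =>
              have hstep : stepA (mk7 v1 v2 v3 v4 v5 none v7) (t, p, r, n) = mk7 v1 v2 v3 v4 v5 (some n) v7 := by
                simp only [stepA]; rw [hc]
                simp [mk7, PySem.Dict.get?_mk_cons, PySem.Dict.insert]
              rw [hstep, ih, hpick_ne v1 "kingdom" (by decide),
                  hpick_ne v2 "phylum" (by decide),
                  hpick_ne v3 "class" (by decide),
                  hpick_ne v4 "order" (by decide),
                  hpick_ne v5 "family" (by decide),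
                  hpick_ne v7 "species" (by decide)]
              simp [pick, hfn_eq]
          | some x =>
              have hstep : stepA (mk7 v1 v2 v3 v4 v5 (some x) v7) (t, p, r, n) = mk7 v1 v2 v3 v4 v5 (some x) v7 := by
                simp only [stepA]; rw [hc]
                simp [mk7, PySem.Dict.get?_mk_cons]
              rw [hstep, ih, hpick_ne v1 "kingdom" (by decide),
                  hpick_ne v2 "phylum" (by decide),
                  hpick_ne v3 "class" (by decide),
                  hpick_ne v4 "order" (by decide),
                  hpick_ne v5 "family" (by decide),
                  hpick_ne v7 "species" (by decide)]
              simp [pick]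
        · subst h
          cases v7 with
          | none =>
              have hstep : stepA (mk7 v1 v2 v3 v4 v5 v6 none) (t, p, r, n) = mk7 v1 v2 v3 v4 v5 v6 (some n) := by
                simp only [stepA]; rw [hc]
                simp [mk7, PySem.Dict.get?_mk_cons, PySem.Dict.insert]
              rw [hstep, ih, hpick_ne v1 "kingdom" (by decide),
                  hpick_ne v2 "phylum" (by decide),
                  hpick_ne v3 "class" (by decide),
                  hpick_ne v4 "order" (by decide),
                  hpick_ne v5 "family" (by decide),
                  hpick_ne v6 "genus" (by decide)]
              simp [pick, hfn_eq]
          | some x =>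
              have hstep : stepA (mk7 v1 v2 v3 v4 v5 v6 (some x)) (t, p, r, n) = mk7 v1 v2 v3 v4 v5 v6 (some x) := by
                simp only [stepA]; rw [hc]
                simp [mk7, PySem.Dict.get?_mk_cons]
              rw [hstep, ih, hpick_ne v1 "kingdom" (by decide),
                  hpick_ne v2 "phylum" (by decide),
                  hpick_ne v3 "class" (by decide),
                  hpick_ne v4 "order" (by decide),
                  hpick_ne v5 "family" (by decide),
                  hpick_ne v6 "genus" (by decide)]
              simp [pick]

-- ===== VERDICT =====
theorem compress_to_7_ranks_spec : Claim_equal_compress_to_7_ranks := by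
  intro lineage _
  unfold Spec_compress_to_7_ranks
  have : initTaxonomyA = mk7 none none none none none none none := rfl
  simp only [compress_to_7_ranks, this, fold_mk7]
  simp [compress_to_7_ranks_alt, pick]
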